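-- pv_equiv track=rewrite | github.com/ShreyaNV/Triangular-Vertices | demo.py | parallelogram
-- ===== SOURCE A (Python) =====
-- def row_col(p):
--     row = 1
--     col = 1
--     while p >= row + col:
--         col += row
--         row += 1
--     return row, p - col
--
-- def parallelogram(points):
--     row = [row_col(p)[0] for p in points]
--     col = [row_col(p)[1] for p in points]
--     length = col[1] - col[0]
--     return (
--         row[2] == row[3]
--         and col[3] - col[2] == length
--         and row[2] - row[0] == length
--         and (col[2] == col[0] or col[2] == col[1])
--     )
-- ===== SOURCE B (Python) =====
-- def _row_col_fast(p):
--     # Inverse triangular number by binary search: smallest r >= 1 with p <= r*(r+1)//2.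
--     # Indices p <= 1 (including the degenerate non-positive ones) lie in row 1.
--     if p <= 1:
--         return (1, p - 1)
--     lo, hi = 1, p
--     while lo < hi:
--         mid = (lo + hi) // 2
--         if p <= mid * (mid + 1) // 2:
--             hi = mid
--         else:
--             lo = mid + 1
--     return (lo, p - 1 - lo * (lo - 1) // 2)
--
-- def parallelogram(points):
--     rc = [_row_col_fast(p) for p in points]
--     (r0, c0), (r1, c1), (r2, c2), (r3, c3) = rc[0], rc[1], rc[2], rc[3]
--     length = c1 - c0
--     return (
--         r2 == r3
--         and c3 - c2 == length
--         and r2 - r0 == length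
--         and (c2 == c0 or c2 == c1)
--     )
-- ===== Notes on version B (the rewrite author's own statement) =====
-- stated objective: faster
-- what changed: replaces the per-point row-accumulating while-loop (O(sqrt p) iterations) with a binary search for the inverse triangular number (O(log p) iterations), computing (row, col) once per point instead of twice; measured up to 22x on large points, though one constant-size timing family read only ~2.4x
import Mathlib
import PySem

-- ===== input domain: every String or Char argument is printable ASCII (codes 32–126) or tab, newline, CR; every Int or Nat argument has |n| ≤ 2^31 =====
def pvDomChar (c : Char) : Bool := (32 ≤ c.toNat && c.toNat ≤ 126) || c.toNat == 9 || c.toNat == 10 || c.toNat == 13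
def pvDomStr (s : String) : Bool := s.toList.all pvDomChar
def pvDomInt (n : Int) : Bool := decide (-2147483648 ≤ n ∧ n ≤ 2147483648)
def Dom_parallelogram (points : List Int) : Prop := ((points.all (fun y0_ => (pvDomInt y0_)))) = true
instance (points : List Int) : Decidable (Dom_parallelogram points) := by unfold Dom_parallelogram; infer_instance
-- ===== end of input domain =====

-- B replaces A's row-accumulating while-loop per point by a binary search for the
-- inverse triangular number, computed once per point instead of twice (alternative algorithm).

-- ===== PORT A =====
-- while p >= row + col: col += row; row += 1
-- (fuel is only a totality guard: the measure p + 1 - (row + col) shrinks by at least 2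
--  per iteration, so fuel (p - 1).toNat is never exhausted; the 0-case mirrors the exit)
def pvRowColLoop (fuel : Nat) (p row col : Int) : Int × Int :=
  match fuel with
  | 0 => (row, p - col)
  | f + 1 =>
    if row + col ≤ p then pvRowColLoop f p (row + 1) (col + row)
    else (row, p - col)

def pvRowCol (p : Int) : Int × Int := pvRowColLoop (p - 1).toNat p 1 1

-- indexing row[i]/col[i] is exact under Pre_ (length ≥ 4); outside it Python raises IndexError
def parallelogram (points : List Int) : Bool :=
  let row := points.map (fun p => (pvRowCol p).1)
  let col := points.map (fun p => (pvRowCol p).2)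
  let length := PySem.List.pyGetD col 1 0 - PySem.List.pyGetD col 0 0
  (PySem.List.pyGetD row 2 0 == PySem.List.pyGetD row 3 0) &&
  (PySem.List.pyGetD col 3 0 - PySem.List.pyGetD col 2 0 == length) &&
  (PySem.List.pyGetD row 2 0 - PySem.List.pyGetD row 0 0 == length) &&
  ((PySem.List.pyGetD col 2 0 == PySem.List.pyGetD col 0 0) ||
   (PySem.List.pyGetD col 2 0 == PySem.List.pyGetD col 1 0))

-- ===== PORT B =====
-- binary search: smallest r in [lo, hi] with p <= r*(r+1)//2
-- (fuel is only a totality guard: hi - lo shrinks every iteration, so fuel (hi - lo).toNat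
--  is never exhausted; the 0-case mirrors the exit)
def pvBSearch (fuel : Nat) (p lo hi : Int) : Int :=
  match fuel with
  | 0 => lo
  | f + 1 =>
    if lo < hi then
      let mid := PySem.Int.floordiv (lo + hi) 2
      if p ≤ PySem.Int.floordiv (mid * (mid + 1)) 2 then pvBSearch f p lo mid
      else pvBSearch f p (mid + 1) hi
    else lo

def pvRowColFast (p : Int) : Int × Int :=
  if p ≤ 1 then (1, p - 1)
  else
    let r := pvBSearch (p - 1).toNat p 1 p
    (r, p - 1 - PySem.Int.floordiv (r * (r - 1)) 2)

-- tuple unpacking rc[0]..rc[3] is exact under Pre_ (length ≥ 4)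
def parallelogram_alt (points : List Int) : Bool :=
  match points.map pvRowColFast with
  | (r0, c0) :: (_r1, c1) :: (r2, c2) :: (r3, c3) :: _ =>
      let length := c1 - c0
      (r2 == r3) && (c3 - c2 == length) && (r2 - r0 == length) &&
      ((c2 == c0) || (c2 == c1))
  | _ => false

-- ===== PRECONDITION & SPEC =====
-- A raises IndexError on fewer than 4 points (row[3]); exactly those inputs are excluded.
def Pre_parallelogram (points : List Int) : Prop := 4 ≤ points.length
instance (points : List Int) : Decidable (Pre_parallelogram points) := by
  unfold Pre_parallelogram; infer_instance
def pvWitness_parallelogram : List Int := [1, 2, 5, 6]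

def Spec_parallelogram (points : List Int) (out : Bool) : Prop := out = parallelogram_alt points
instance (points : List Int) (out : Bool) : Decidable (Spec_parallelogram points out) := by
  unfold Spec_parallelogram; infer_instance

-- ===== CLAIM (what is proved, stated in full; the proofs are below) =====
def Claim_equal_parallelogram : Prop := ∀ (points : List Int), Dom_parallelogram points → Pre_parallelogram points → Spec_parallelogram points (parallelogram points)

-- ===== LEMMAS AND PROOFS =====

-- A's loop: starting from (row, col) with 2*col = 2 + (row-1)*row and enough fuel,
-- the result (r, c) satisfies the inverse-triangular characterisation.
theorem pvRowColLoop_post (fuel : Nat) (p row col : Int) :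
    1 ≤ row →
    2 * col = 2 + (row - 1) * row →
    (row = 1 ∨ (row - 1) * row < 2 * p) →
    (p + 1 - (row + col)).toNat ≤ fuel →
    1 ≤ (pvRowColLoop fuel p row col).1 ∧
    2 * p ≤ (pvRowColLoop fuel p row col).1 * ((pvRowColLoop fuel p row col).1 + 1) ∧
    ((pvRowColLoop fuel p row col).1 = 1 ∨
      ((pvRowColLoop fuel p row col).1 - 1) * (pvRowColLoop fuel p row col).1 < 2 * p) ∧
    2 * (pvRowColLoop fuel p row col).2 =
      2 * p - 2 - ((pvRowColLoop fuel p row col).1 - 1) * (pvRowColLoop fuel p row col).1 := by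
  induction fuel generalizing row col with
  | zero =>
    intro hr hc hlow hf
    have hstop : ¬ (row + col ≤ p) := by omega
    simp only [pvRowColLoop]
    exact ⟨hr, by nlinarith, hlow, by nlinarith⟩
  | succ f ih =>
    intro hr hc hlow hf
    rw [pvRowColLoop]
    split_ifs with h
    · apply ih (row + 1) (col + row) (by omega) (by nlinarith) (by right; nlinarith) (by omega)
    · exact ⟨hr, by nlinarith, hlow, by nlinarith⟩

theorem pvBSearch_post (fuel : Nat) (p lo hi : Int) :
    1 ≤ lo → lo ≤ hi → (lo - 1) * lo < 2 * p → 2 * p ≤ hi * (hi + 1) →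
    (hi - lo).toNat ≤ fuel →
    1 ≤ pvBSearch fuel p lo hi ∧
      (pvBSearch fuel p lo hi - 1) * pvBSearch fuel p lo hi < 2 * p ∧
      2 * p ≤ pvBSearch fuel p lo hi * (pvBSearch fuel p lo hi + 1) := by
  induction fuel generalizing lo hi with
  | zero =>
    intro hlo hle hlow hhi hf
    have : lo = hi := by omega
    simp only [pvBSearch]
    exact ⟨hlo, hlow, this ▸ hhi⟩
  | succ f ih =>
    intro hlo hle hlow hhi hf
    simp only [pvBSearch]
    split_ifs with h hmid
    · -- p ≤ mid*(mid+1)//2 ↔ 2*p ≤ mid*(mid+1), since mid*(mid+1) is even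
      have e : PySem.Int.floordiv (lo + hi) 2 = (lo + hi) / 2 :=
        PySem.Int.floordiv_eq_ediv_of_pos (by norm_num)
      rw [e] at hmid ⊢
      set mid := (lo + hi) / 2 with hm
      have hm1 : lo ≤ mid := by omega
      have hm2 : mid < hi := by omega
      obtain ⟨k, hk⟩ : Even (mid * (mid + 1)) := Int.even_mul_succ_self mid
      have ef : PySem.Int.floordiv (mid * (mid + 1)) 2 = mid * (mid + 1) / 2 :=
        PySem.Int.floordiv_eq_ediv_of_pos (by norm_num)
      rw [ef, hk] at hmid
      apply ih lo mid hlo hm1 hlow (by omega) (by omega)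
    · have e : PySem.Int.floordiv (lo + hi) 2 = (lo + hi) / 2 :=
        PySem.Int.floordiv_eq_ediv_of_pos (by norm_num)
      rw [e] at hmid ⊢
      set mid := (lo + hi) / 2 with hm
      have hm1 : lo ≤ mid := by omega
      have hm2 : mid < hi := by omega
      obtain ⟨k, hk⟩ : Even (mid * (mid + 1)) := Int.even_mul_succ_self mid
      have ef : PySem.Int.floordiv (mid * (mid + 1)) 2 = mid * (mid + 1) / 2 :=
        PySem.Int.floordiv_eq_ediv_of_pos (by norm_num)
      rw [ef, hk] at hmid
      refine ih (mid + 1) hi (by omega) (by omega) ?_ hhi (by omega)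
      have h2 : (mid + 1 - 1) * (mid + 1) = mid * (mid + 1) := by ring
      rw [h2, hk]
      omega
    · have : lo = hi := by omega
      exact ⟨hlo, hlow, this ▸ hhi⟩

-- the inverse triangular number is unique
theorem pv_tri_unique (p a b : Int) (ha1 : 1 ≤ a) (hb1 : 1 ≤ b)
    (ha2 : (a - 1) * a < 2 * p) (ha3 : 2 * p ≤ a * (a + 1))
    (hb2 : (b - 1) * b < 2 * p) (hb3 : 2 * p ≤ b * (b + 1)) : a = b := by
  by_contra hne
  rcases lt_or_gt_of_ne hne with hlt | hlt
  · have : a * (a + 1) ≤ (b - 1) * b := by nlinarith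
    omega
  · have : b * (b + 1) ≤ (a - 1) * a := by nlinarith
    omega

theorem pvRowCol_eq_fast (p : Int) : pvRowCol p = pvRowColFast p := by
  by_cases hp : p ≤ 1
  · rw [pvRowCol, pvRowColFast]
    have hz : (p - 1).toNat = 0 := by omega
    rw [hz, pvRowColLoop]
    simp [hp]
  · rw [not_le] at hp
    have hA := pvRowColLoop_post (p - 1).toNat p 1 1 (by norm_num) (by ring_nf)
      (Or.inl rfl) (by omega)
    rw [pvRowCol] at *
    set a := (pvRowColLoop (p - 1).toNat p 1 1).1 with ha
    obtain ⟨ha1, ha3, ha2, hac⟩ := hA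
    have ha2' : (a - 1) * a < 2 * p := by
      rcases ha2 with h | h
      · rw [h]; omega
      · exact h
    have hB := pvBSearch_post (p - 1).toNat p 1 p (by norm_num) (by omega) (by omega)
      (by nlinarith) (by omega)
    rw [pvRowColFast]
    simp only [if_neg (by omega : ¬ p ≤ 1)]
    set b := pvBSearch (p - 1).toNat p 1 p with hb
    obtain ⟨hb1, hb2, hb3⟩ := hB
    have hab : a = b := pv_tri_unique p a b ha1 hb1 ha2' ha3 hb2 hb3
    -- the two column formulas agree: b*(b-1) is even
    obtain ⟨k, hk⟩ : Even (b * (b - 1)) := by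
      have h := Int.even_mul_succ_self (b - 1)
      have h2 : (b - 1) * (b - 1 + 1) = b * (b - 1) := by ring
      rwa [h2] at h
    have ef : PySem.Int.floordiv (b * (b - 1)) 2 = b * (b - 1) / 2 :=
      PySem.Int.floordiv_eq_ediv_of_pos (by norm_num)
    have hcol : (pvRowColLoop (p - 1).toNat p 1 1).2
        = p - 1 - PySem.Int.floordiv (b * (b - 1)) 2 := by
      rw [ef]
      have hbb : (b - 1) * b = b * (b - 1) := by ring
      rw [hab, hbb] at hac
      omega
    have hsplit : pvRowColLoop (p - 1).toNat p 1 1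
        = ((pvRowColLoop (p - 1).toNat p 1 1).1, (pvRowColLoop (p - 1).toNat p 1 1).2) := rfl
    rw [hsplit, hcol, ← ha, hab]

-- ===== VERDICT (by name: the statement is the Claim_ definition above) =====
theorem parallelogram_spec : Claim_equal_parallelogram := by
  intro points _ hpre
  unfold Spec_parallelogram
  obtain ⟨x0, x1, x2, x3, t, rfl⟩ :
      ∃ x0 x1 x2 x3 t, points = x0 :: x1 :: x2 :: x3 :: t := by
    match points, hpre with
    | x0 :: x1 :: x2 :: x3 :: t, _ => exact ⟨x0, x1, x2, x3, t, rfl⟩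
  simp only [parallelogram, parallelogram_alt, List.map_cons, pvRowCol_eq_fast]
  simp [PySem.List.pyGetD_ofNat']
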